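-- pv_equiv track=rewrite | github.com/yanhr21/Genie | runner/ge_trainer.py | _build_first_frame_only_indices
-- ===== SOURCE A (Python) =====
-- from typing import Any, Dict, List, Optional
--
-- def _build_first_frame_only_indices(total_t: int, mem_size: int) -> List[int]:
--     total_t = max(1, int(total_t))
--     mem_size = max(1, int(mem_size))
--     future_len = max(0, total_t - mem_size)
--     indices = [0] * mem_size
--     indices.extend(min(i, total_t - 1) for i in range(1, 1 + future_len))
--     if len(indices) < total_t:
--         indices.extend([indices[-1]] * (total_t - len(indices)))
--     return indices[:total_t]
-- ===== SOURCE B (Python) =====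
-- def _build_first_frame_only_indices(total_t, mem_size):
--     t = max(1, int(total_t))
--     m = max(1, int(mem_size))
--     return [max(0, p - m + 1) for p in range(t)]
-- ===== Notes on version B (the rewrite author's own statement) =====
-- stated objective: simpler
-- what changed: Replaces A's segmented construction (zero prefix, clipped range segment, padding extend, final slice) with a single closed-form comprehension max(0, p - mem_size + 1) over range(total_t).
import Mathlib
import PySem

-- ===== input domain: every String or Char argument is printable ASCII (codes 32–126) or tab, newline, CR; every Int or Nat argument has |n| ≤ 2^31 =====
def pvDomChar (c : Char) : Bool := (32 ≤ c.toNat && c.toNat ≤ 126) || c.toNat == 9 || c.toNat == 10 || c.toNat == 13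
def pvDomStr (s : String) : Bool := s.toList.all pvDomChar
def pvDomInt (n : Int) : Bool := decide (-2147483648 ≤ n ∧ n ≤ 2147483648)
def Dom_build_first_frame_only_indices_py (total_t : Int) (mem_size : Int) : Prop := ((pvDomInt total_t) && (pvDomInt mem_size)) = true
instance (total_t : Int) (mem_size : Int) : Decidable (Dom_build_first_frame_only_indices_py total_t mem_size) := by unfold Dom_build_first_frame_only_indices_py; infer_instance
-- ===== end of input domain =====

-- B replaces A's segmented construction (zero prefix + clipped range + padding + slice) by the
-- closed form max(0, p - mem_size + 1) for each position p — objective: simpler.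

-- ===== PORT A =====
def build_first_frame_only_indices_py (total_t : Int) (mem_size : Int) : List Int :=
  let total_t := max 1 total_t
  let mem_size := max 1 mem_size
  let future_len := max 0 (total_t - mem_size)
  let indices : List Int := List.replicate mem_size.toNat 0
  let indices := indices ++ (PySem.List.pyRange 1 (1 + future_len) 1).map (fun i => min i (total_t - 1))
  -- indices[-1]: mem_size ≥ 1 keeps the list nonempty, so getD 0 is exact here
  let indices := if (indices.length : Int) < total_t then
      indices ++ List.replicate (total_t - (indices.length : Int)).toNat ((PySem.List.pyGet? indices (-1)).getD 0)
    else indices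
  PySem.List.slice indices none (some total_t)

-- ===== PORT B =====
def build_first_frame_only_indices_py_alt (total_t : Int) (mem_size : Int) : List Int :=
  let t := max 1 total_t
  let m := max 1 mem_size
  (PySem.List.pyRange 0 t 1).map (fun p => max 0 (p - m + 1))

-- ===== PRECONDITION & SPEC =====
def Spec_build_first_frame_only_indices_py (total_t : Int) (mem_size : Int) (out : List Int) : Prop := out = build_first_frame_only_indices_py_alt total_t mem_size
instance (total_t : Int) (mem_size : Int) (out : List Int) : Decidable (Spec_build_first_frame_only_indices_py total_t mem_size out) := by unfold Spec_build_first_frame_only_indices_py; infer_instance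

-- ===== CLAIM (what is proved, stated in full; the proofs are below) =====
def Claim_equal_build_first_frame_only_indices_py : Prop := ∀ (total_t : Int) (mem_size : Int), Dom_build_first_frame_only_indices_py total_t mem_size → Spec_build_first_frame_only_indices_py total_t mem_size (build_first_frame_only_indices_py total_t mem_size)

-- ===== LEMMAS AND PROOFS =====
theorem bffoi_core (t m : Int) (ht : 1 ≤ t) (hm : 1 ≤ m) :
    build_first_frame_only_indices_py t m = build_first_frame_only_indices_py_alt t m := by
  unfold build_first_frame_only_indices_py build_first_frame_only_indices_py_alt
  simp only [max_eq_right ht, max_eq_right hm]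
  have hlen : ((List.replicate m.toNat (0:Int) ++ (PySem.List.pyRange 1 (1 + max 0 (t - m)) 1).map (fun i => min i (t - 1))).length : Int)
      = m + max 0 (t - m) := by
    simp [PySem.List.length_pyRange_one]
    omega
  rw [if_neg (by omega)]
  rw [PySem.List.slice_to _ (by omega)]
  apply List.ext_getElem
  · simp [PySem.List.length_pyRange_one]; omega
  · intro k h1 h2
    simp only [List.getElem_take, List.getElem_map, PySem.List.getElem_pyRange_one]
    by_cases hk : k < m.toNat
    · rw [List.getElem_append_left (by simpa using hk)]
      simp only [List.getElem_replicate]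
      omega
    · have hL : (List.replicate m.toNat (0:Int)).length ≤ k := by simpa using Nat.le_of_not_lt hk
      rw [List.getElem_append_right hL]
      simp only [List.getElem_map, PySem.List.getElem_pyRange_one, List.length_replicate]
      have h2' : k < t.toNat := by simpa [PySem.List.length_pyRange_one] using h2
      have hc : (↑(k - m.toNat) : Int) = (k : Int) - m := by omega
      rw [hc]
      omega

-- ===== VERDICT (by name: the statement is the Claim_ definition above) =====
theorem build_first_frame_only_indices_py_spec : Claim_equal_build_first_frame_only_indices_py := by
  intro total_t mem_size _
  unfold Spec_build_first_frame_only_indices_py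
  have h := bffoi_core (max 1 total_t) (max 1 mem_size) (le_max_left _ _) (le_max_left _ _)
  unfold build_first_frame_only_indices_py build_first_frame_only_indices_py_alt at h ⊢
  rw [max_eq_right (le_max_left 1 total_t), max_eq_right (le_max_left 1 mem_size)] at h
  exact h
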